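-- pv_equiv track=rewrite | github.com/ViolaLeee/DM-StreamData | moment.py | surpriseNumber
-- ===== SOURCE A (Python) =====
-- def surpriseNumber(rawlist):
--     distinctEle = set(rawlist)
--     dictionary = {}
--     for item in distinctEle:
--         dictionary.update({item:rawlist.count(item)})
--     surpriseNum = 0
--     for items in dictionary:
--         surpriseNum = surpriseNum + dictionary[items]**2
--     return surpriseNum
-- ===== SOURCE B (Python) =====
-- def surpriseNumber(rawlist):
--     counts = {}
--     surprise = 0
--     for x in rawlist:
--         prev = counts.get(x, 0)
--         surprise += 2 * prev + 1
--         counts[x] = prev + 1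
--     return surprise
-- ===== Notes on version B (the rewrite author's own statement) =====
-- stated objective: faster
-- what changed: Replaces A's set-building plus a rawlist.count scan per distinct element plus a separate squaring loop with a single online pass that accumulates the second moment via f^2 = sum of the first f odd numbers (surprise += 2*prev + 1 per element).
import Mathlib
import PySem

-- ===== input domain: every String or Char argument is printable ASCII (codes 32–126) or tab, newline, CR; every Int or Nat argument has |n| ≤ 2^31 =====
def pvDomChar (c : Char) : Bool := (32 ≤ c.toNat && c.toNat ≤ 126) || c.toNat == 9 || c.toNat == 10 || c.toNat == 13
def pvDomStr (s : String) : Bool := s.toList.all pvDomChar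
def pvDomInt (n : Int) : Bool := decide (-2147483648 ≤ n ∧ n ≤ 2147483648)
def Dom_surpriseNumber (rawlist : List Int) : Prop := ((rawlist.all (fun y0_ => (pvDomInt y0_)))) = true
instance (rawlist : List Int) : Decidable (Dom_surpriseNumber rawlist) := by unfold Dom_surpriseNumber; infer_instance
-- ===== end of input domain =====

-- B computes the second moment in one online pass (surprise += 2*prev + 1 per element),
-- replacing A's set + per-distinct-element rawlist.count scans + separate squaring loop: faster (O(n) vs O(n*d)).

-- ===== PORT A =====
-- A iterates 'for items in dictionary' over the dict's keys, so dictionary[items] always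
-- hits; getD 0 is exact there. Iteration over the set feeds a dict only summed afterwards,
-- so the result cannot depend on Python's hash order.
def surpriseNumber (rawlist : List Int) : Int :=
  let distinctEle : PySem.Set Int := PySem.Set.ofList rawlist
  let dictionary : PySem.Dict Int Int :=
    distinctEle.foldl (fun d item => d.insert item ((PySem.List.count rawlist item : Int))) PySem.Dict.empty
  dictionary.keys.foldl (fun surpriseNum items => surpriseNum + (dictionary.getD items 0) ^ 2) 0

-- ===== PORT B =====
def surpriseNumber_alt (rawlist : List Int) : Int :=
  (rawlist.foldl
    (fun (st : PySem.Dict Int Int × Int) x =>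
      let prev := st.1.getD x 0
      (st.1.insert x (prev + 1), st.2 + (2 * prev + 1)))
    (PySem.Dict.empty, 0)).2

-- ===== PRECONDITION & SPEC =====
def Spec_surpriseNumber (rawlist : List Int) (out : Int) : Prop := out = surpriseNumber_alt rawlist
instance (rawlist : List Int) (out : Int) : Decidable (Spec_surpriseNumber rawlist out) := by unfold Spec_surpriseNumber; infer_instance

-- ===== CLAIM (what is proved, stated in full; the proofs are below) =====
def Claim_equal_surpriseNumber : Prop := ∀ (rawlist : List Int), Dom_surpriseNumber rawlist → Spec_surpriseNumber rawlist (surpriseNumber rawlist)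

-- ===== LEMMAS AND PROOFS =====

-- the second moment, as a sum of squared counts over the distinct elements
def sqSum (l : List Int) : Int :=
  ((PySem.Set.ofList l).map (fun k => ((List.count k l : Int)) ^ 2)).sum

theorem foldl_add_eq_append (t : List Int) : ∀ (s : List Int), (s ++ t).Nodup →
    t.foldl PySem.Set.add s = s ++ t := by
  induction t with
  | nil => intro s _; simp
  | cons a t ih =>
    intro s h
    have ha : a ∉ s := by
      intro hm
      exact (List.nodup_append.mp h).2.2 a hm a (List.mem_cons_self ..) rfl
    have hadd : PySem.Set.add s a = s ++ [a] := by
      simp [PySem.Set.add, PySem.Set.contains, ha]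
    rw [List.foldl_cons, hadd, ih (s ++ [a]) (by simpa using h)]
    simp

theorem ofList_append_singleton (l : List Int) (x : Int) :
    PySem.Set.ofList (l ++ [x]) =
      if x ∈ l then PySem.Set.ofList l else PySem.Set.ofList l ++ [x] := by
  rw [PySem.Set.ofList_eq_foldl, List.foldl_append, ← PySem.Set.ofList_eq_foldl]
  by_cases h : x ∈ l <;>
    simp [PySem.Set.add, PySem.Set.contains, PySem.Set.mem_ofList, h]

theorem sum_map_update (f g : Int → Int) (x : Int) :
    ∀ (l : List Int), l.Nodup → x ∈ l → (∀ y ∈ l, y ≠ x → f y = g y) →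
    (l.map f).sum = (l.map g).sum + (f x - g x) := by
  intro l
  induction l with
  | nil => intro _ hx; exact absurd hx (List.not_mem_nil)
  | cons a t ih =>
    intro hnd hx hfg
    rcases List.mem_cons.mp hx with rfl | hxt
    · have : t.map f = t.map g := by
        apply List.map_congr_left
        intro y hy
        exact hfg y (List.mem_cons_of_mem _ hy) (fun hyx => ((List.nodup_cons.mp hnd).1 (hyx ▸ hy)))
      simp [this]; ring
    · have hax : a ≠ x := fun h => (List.nodup_cons.mp hnd).1 (h ▸ hxt)
      have := ih (List.nodup_cons.mp hnd).2 hxt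
        (fun y hy hyx => hfg y (List.mem_cons_of_mem _ hy) hyx)
      simp [this, hfg a (List.mem_cons_self ..) hax]; ring

theorem sqSum_append (l : List Int) (x : Int) :
    sqSum (l ++ [x]) = sqSum l + 2 * (List.count x l : Int) + 1 := by
  by_cases h : x ∈ l
  · rw [sqSum, sqSum, ofList_append_singleton, if_pos h]
    rw [sum_map_update (fun k => ((List.count k (l ++ [x]) : Int)) ^ 2)
      (fun k => ((List.count k l : Int)) ^ 2) x (PySem.Set.ofList l)
      (PySem.Set.nodup_ofList l) ((PySem.Set.mem_ofList l x).mpr h)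
      (by intro y _ hyx; simp [List.count_append, Ne.symm hyx])]
    simp [List.count_append]
    ring
  · rw [sqSum, sqSum, ofList_append_singleton, if_neg h]
    have hc0 : List.count x l = 0 := List.count_eq_zero.mpr h
    have hmap : (PySem.Set.ofList l).map (fun k => ((List.count k (l ++ [x]) : Int)) ^ 2)
        = (PySem.Set.ofList l).map (fun k => ((List.count k l : Int)) ^ 2) := by
      apply List.map_congr_left
      intro y hy
      have hyx : y ≠ x := fun hh => h (hh ▸ (PySem.Set.mem_ofList l y).mp hy)
      simp [List.count_append, Ne.symm hyx]
    rw [List.map_append, List.sum_append, hmap]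
    simp [List.count_append, List.count_cons, hc0]

theorem getD_fold_const (f : Int → Int) (k : Int) :
    ∀ (es : List Int) (d : PySem.Dict Int Int),
    (es.foldl (fun d item => d.insert item (f item)) d).getD k 0 =
      if k ∈ es then f k else d.getD k 0 := by
  intro es
  induction es with
  | nil => intro d; simp
  | cons a t ih =>
    intro d
    rw [List.foldl_cons, ih]
    by_cases h1 : k ∈ t
    · simp [h1]
    · by_cases h2 : k = a <;>
        simp [h1, h2, PySem.Dict.getD_insert]

theorem altFold_fst : ∀ (l : List Int) (d : PySem.Dict Int Int) (s : Int),
    (l.foldl (fun (st : PySem.Dict Int Int × Int) x =>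
        (st.1.insert x (st.1.getD x 0 + 1), st.2 + (2 * st.1.getD x 0 + 1))) (d, s)).1
    = l.foldl (fun d x => d.insert x (d.getD x 0 + 1)) d := by
  intro l
  induction l with
  | nil => intro d s; rfl
  | cons a t ih => intro d s; simp only [List.foldl_cons]; exact ih _ _

theorem a_eq_sqSum (l : List Int) : surpriseNumber l = sqSum l := by
  simp only [surpriseNumber]
  rw [PySem.List.foldl_add, PySem.Dict.keys_foldl_insert]
  have hkeys : PySem.Set.update (PySem.Dict.empty : PySem.Dict Int Int).keys (PySem.Set.ofList l)
      = PySem.Set.ofList l := by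
    have h1 : (PySem.Dict.empty : PySem.Dict Int Int).keys = [] := rfl
    rw [h1]
    show (PySem.Set.ofList l).foldl PySem.Set.add [] = PySem.Set.ofList l
    simpa using foldl_add_eq_append (PySem.Set.ofList l) []
      (by rw [List.nil_append]; exact PySem.Set.nodup_ofList l)
  rw [hkeys]
  have hmap : ∀ y ∈ PySem.Set.ofList l,
      (((PySem.Set.ofList l).foldl
          (fun d item => d.insert item ((PySem.List.count l item : Int)))
          PySem.Dict.empty).getD y 0) ^ 2
        = ((List.count y l : Int)) ^ 2 := by
    intro y hy
    rw [getD_fold_const, if_pos hy, PySem.List.count_eq]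
  rw [List.map_congr_left hmap, sqSum]
  simp

theorem alt_append (l : List Int) (x : Int) :
    surpriseNumber_alt (l ++ [x]) = surpriseNumber_alt l + 2 * (List.count x l : Int) + 1 := by
  simp only [surpriseNumber_alt, List.foldl_append, List.foldl_cons, List.foldl_nil,
    altFold_fst, PySem.Dict.foldl_insert_getD_add_one_eq_counter, PySem.Dict.getD_counter]
  ring

theorem alt_eq_sqSum (l : List Int) : surpriseNumber_alt l = sqSum l := by
  induction l using List.reverseRecOn with
  | nil => rfl
  | append_singleton l x ih => rw [alt_append, ih, sqSum_append]

-- ===== VERDICT (by name: the statement is the Claim_ definition above) =====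
theorem surpriseNumber_spec : Claim_equal_surpriseNumber := by
  intro rawlist _
  simp only [Spec_surpriseNumber]
  rw [a_eq_sqSum, alt_eq_sqSum]
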